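-- pv_equiv track=rewrite | github.com/ctlab/hammlet | src/hammlet/utils.py | morph10
-- ===== SOURCE A (Python) =====
-- def morph10(iterable, permutation):
--     """
--     Apply permutation on 10-iterable. (y-values)
--
--     >>> morph10(42, None)
--     42
--     >>> morph10((1, 2, 3, 4, 5, 6, 7, 8, 9, 10), (2, 4, 3, 1))
--     (5, 7, 6, 2, 10, 9, 4, 8, 3, 1)
--     """
--     if permutation is None:
--         return iterable
--
--     A = {}
--     it = iter(iterable)
--     for i in range(4):
--         for j in range(i, 4):
--             A[i, j] = A[j, i] = next(it)
--
--     return tuple(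
--         A[permutation[i] - 1, permutation[j] - 1] for i in range(4) for j in range(i, 4)
--     )
-- ===== SOURCE B (Python) =====
-- _PAIRS = [(i, j) for i in range(4) for j in range(i, 4)]
--
--
-- def morph10(iterable, permutation):
--     """Scatter each drawn value straight to its destination cell via the
--     inverse permutation (no symmetric matrix is ever assembled)."""
--     if permutation is None:
--         return iterable
--     inv = {permutation[k]: k for k in range(4)}  # 1-based value -> new index
--     it = iter(iterable)
--     out = [None] * 10
--     for i, j in _PAIRS:
--         a, b = inv[i + 1], inv[j + 1]
--         if a > b:
--             a, b = b, a
--         out[a * 4 - a * (a - 1) // 2 + (b - a)] = next(it)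
--     return tuple(out)
-- ===== Notes on version B (the rewrite author's own statement) =====
-- stated objective: alternative
-- what changed: Replaces A's gather (build a symmetric 16-entry dict with nested loops, then look up each output cell through the permutation) by a scatter: compute the inverse permutation once and, in one pass over the 10 incoming values, write each value directly into its destination slot of a flat output list; no symmetric matrix is ever assembled.
import Mathlib
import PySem

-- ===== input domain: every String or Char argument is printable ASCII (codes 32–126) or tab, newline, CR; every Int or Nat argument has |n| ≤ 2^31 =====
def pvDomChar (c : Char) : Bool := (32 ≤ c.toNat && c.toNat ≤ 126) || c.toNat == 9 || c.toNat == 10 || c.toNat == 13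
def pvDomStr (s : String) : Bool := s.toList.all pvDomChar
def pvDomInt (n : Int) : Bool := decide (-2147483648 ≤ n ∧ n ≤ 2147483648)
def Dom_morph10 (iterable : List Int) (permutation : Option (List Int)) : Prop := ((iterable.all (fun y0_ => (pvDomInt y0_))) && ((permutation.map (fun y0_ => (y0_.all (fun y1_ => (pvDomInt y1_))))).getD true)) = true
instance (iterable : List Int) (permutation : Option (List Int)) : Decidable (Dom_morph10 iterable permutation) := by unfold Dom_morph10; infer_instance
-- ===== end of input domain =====

-- B is a different algorithm: instead of A's gather through a symmetric dict, it
-- scatters each of the 10 drawn values straight to its destination slot via the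
-- inverse permutation (objective: alternative, same cost).


-- ===== PORT A =====
-- Literal port of A: build the symmetric dict A[i,j] = A[j,i] = next(it) over
-- the nested range loops (the Nat component of the fold state is the iterator
-- position), then read the dict back through the permutation.
def morph10 (iterable : List Int) (permutation : Option (List Int)) : List Int :=
  match permutation with
  | none => iterable
  | some p =>
    let st :=
      (PySem.List.pyRange 0 4 1).foldl (fun (s : PySem.Dict (Int × Int) Int × Nat) i =>
        (PySem.List.pyRange i 4 1).foldl (fun (s : PySem.Dict (Int × Int) Int × Nat) j =>
          let v := (PySem.List.pyGet? iterable (Int.ofNat s.2)).getD 0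
          (((s.1.insert (i, j) v).insert (j, i) v), s.2 + 1)) s)
        (PySem.Dict.empty, 0)
    let A := st.1
    (PySem.List.pyRange 0 4 1).flatMap (fun i =>
      (PySem.List.pyRange i 4 1).map (fun j =>
        (A.get? (((PySem.List.pyGet? p i).getD 0) - 1,
                 ((PySem.List.pyGet? p j).getD 0) - 1)).getD 0))

-- ===== PORT B =====
-- Source B's module constant _PAIRS: the 10 upper-triangular cells in row-major order.
def pvPairs : List (Int × Int) :=
  (PySem.List.pyRange 0 4 1).flatMap (fun i =>
    (PySem.List.pyRange i 4 1).map (fun j => (i, j)))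

-- Port of B (Source B): inverse-permutation dict, then one pass over pvPairs that
-- scatters the s.2-th drawn value (Python's next(it)) into the flat output list.
-- Python's [None]*10 is ported as `replicate 10 0` and `out[idx] = v` as
-- `set idx.toNat v`: exact on Pre_, where every slot is written and idx ∈ [0,9].
def morph10_alt (iterable : List Int) (permutation : Option (List Int)) : List Int :=
  match permutation with
  | none => iterable
  | some p =>
    let inv : PySem.Dict Int Int :=
      (PySem.List.pyRange 0 4 1).foldl
        (fun d k => d.insert ((PySem.List.pyGet? p k).getD 0) k) PySem.Dict.empty
    let st := pvPairs.foldl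
      (fun (s : List Int × Nat) ij =>
        let a0 := (inv.get? (ij.1 + 1)).getD 0
        let b0 := (inv.get? (ij.2 + 1)).getD 0
        let a := if a0 > b0 then b0 else a0
        let b := if a0 > b0 then a0 else b0
        let idx := a * 4 - PySem.Int.floordiv (a * (a - 1)) 2 + (b - a)
        let v := (PySem.List.pyGet? iterable (Int.ofNat s.2)).getD 0
        (s.1.set idx.toNat v, s.2 + 1))
      (List.replicate 10 0, 0)
    st.1

-- ===== PRECONDITION & SPEC =====
-- Pre_: with a permutation present, both programs need the natural domain —
-- at least 10 values in the iterable (A: StopIteration, B: StopIteration),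
-- at least 4 entries in the permutation (both: IndexError) and the first four
-- entries forming a true permutation of 1..4: out-of-range entries make both
-- raise KeyError, and on duplicate entries (not a permutation, outside the
-- function's natural domain) B's inverse-permutation dict lacks a key and
-- raises KeyError where A's symmetric-dict gather still returns a tuple.
def Pre_morph10 (iterable : List Int) (permutation : Option (List Int)) : Prop :=
  ((permutation.map (fun p => decide (10 ≤ iterable.length ∧ 4 ≤ p.length ∧
      (p.take 4).Perm [1, 2, 3, 4]))).getD true) = true
instance (iterable : List Int) (permutation : Option (List Int)) : Decidable (Pre_morph10 iterable permutation) := by unfold Pre_morph10; infer_instance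

def pvWitness_morph10 : List Int × Option (List Int) :=
  ([1, 2, 3, 4, 5, 6, 7, 8, 9, 10], some [2, 4, 3, 1])

def Spec_morph10 (iterable : List Int) (permutation : Option (List Int)) (out : List Int) : Prop := out = morph10_alt iterable permutation
instance (iterable : List Int) (permutation : Option (List Int)) (out : List Int) : Decidable (Spec_morph10 iterable permutation out) := by unfold Spec_morph10; infer_instance

-- ===== CLAIM (what is proved, stated in full; the proofs are below) =====
def Claim_equal_morph10 : Prop := ∀ (iterable : List Int) (permutation : Option (List Int)), Dom_morph10 iterable permutation → Pre_morph10 iterable permutation → Spec_morph10 iterable permutation (morph10 iterable permutation)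

-- ===== LEMMAS AND PROOFS =====

-- For each of the 24 true permutations (a,b,c,d) of 1..4, A's gather and B's
-- scatter evaluate to the same ten-element list of drawn values.
set_option maxHeartbeats 1600000 in
theorem ports_agree (x0 x1 x2 x3 x4 x5 x6 x7 x8 x9 : Int) (r q : List Int)
    (a b c d : Int) (hperm : List.Perm [a, b, c, d] [1, 2, 3, 4]) :
    morph10 (x0::x1::x2::x3::x4::x5::x6::x7::x8::x9::r) (some (a::b::c::d::q)) =
    morph10_alt (x0::x1::x2::x3::x4::x5::x6::x7::x8::x9::r) (some (a::b::c::d::q)) := by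
  have ha : a = 1 ∨ a = 2 ∨ a = 3 ∨ a = 4 := by
    have : a ∈ [1, 2, 3, 4] := hperm.mem_iff.mp (by simp)
    simpa using this
  have hb : b = 1 ∨ b = 2 ∨ b = 3 ∨ b = 4 := by
    have : b ∈ [1, 2, 3, 4] := hperm.mem_iff.mp (by simp)
    simpa using this
  have hc : c = 1 ∨ c = 2 ∨ c = 3 ∨ c = 4 := by
    have : c ∈ [1, 2, 3, 4] := hperm.mem_iff.mp (by simp)
    simpa using this
  have hd : d = 1 ∨ d = 2 ∨ d = 3 ∨ d = 4 := by
    have : d ∈ [1, 2, 3, 4] := hperm.mem_iff.mp (by simp)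
    simpa using this
  have h04 : PySem.List.pyRange 0 4 1 = [0, 1, 2, 3] := by decide
  have h14 : PySem.List.pyRange 1 4 1 = [1, 2, 3] := by decide
  have h24 : PySem.List.pyRange 2 4 1 = [2, 3] := by decide
  have h34 : PySem.List.pyRange 3 4 1 = [3] := by decide
  have hpr : pvPairs = [(0,0),(0,1),(0,2),(0,3),(1,1),(1,2),(1,3),(2,2),(2,3),(3,3)] := by
    decide
  have g0 : PySem.List.pyGet? (a::b::c::d::q) (0 : Int) = some a := by simp [pysem]
  have g1 : PySem.List.pyGet? (a::b::c::d::q) (1 : Int) = some b := by simp [pysem]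
  have g2 : PySem.List.pyGet? (a::b::c::d::q) (2 : Int) = some c := by simp [pysem]
  have g3 : PySem.List.pyGet? (a::b::c::d::q) (3 : Int) = some d := by simp [pysem]
  rcases ha with rfl | rfl | rfl | rfl <;>
    rcases hb with rfl | rfl | rfl | rfl <;>
      rcases hc with rfl | rfl | rfl | rfl <;>
        rcases hd with rfl | rfl | rfl | rfl <;>
          first
            | exact absurd hperm (by decide)
            | simp [morph10, morph10_alt, hpr, h04, h14, h24, h34, g0, g1, g2, g3,
                PySem.Dict.insert, PySem.Dict.contains, PySem.Dict.get?, PySem.Dict.empty,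
                List.set, PySem.Int.floordiv]

-- ===== VERDICT (by name: the statement is the Claim_ definition above) =====
theorem morph10_spec : Claim_equal_morph10 := by
  intro iterable permutation _ hpre
  match permutation with
  | none => rfl
  | some p =>
    simp only [Pre_morph10, Option.map_some, Option.getD_some, decide_eq_true_eq] at hpre
    obtain ⟨hlen, hplen, hperm⟩ := hpre
    match iterable, hlen with
    | x0::x1::x2::x3::x4::x5::x6::x7::x8::x9::r, _ =>
      match p, hplen with
      | a::b::c::d::q, _ =>
        have hperm' : List.Perm [a, b, c, d] [1, 2, 3, 4] := by
          simpa using hperm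
        exact ports_agree x0 x1 x2 x3 x4 x5 x6 x7 x8 x9 r q a b c d hperm'
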